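-- pv_equiv track=rewrite | github.com/easonnie/semanticRetrievalMRS | src/build_rindex/rindex.py | get_sentence_tokens
-- ===== SOURCE A (Python) =====
-- def get_sentence_tokens(texts, charoffsets):
--     whole_text = "".join(texts)
--     tokens = []
--     sentence_offsets = []
--
--     start_t = 0
--     end_t = 0
--     for offset_list in charoffsets:
--         end_t = start_t
--         for start, end in offset_list:
--             cur_token = whole_text[start:end]
--             if len(cur_token) > 0:
--                 tokens.append(cur_token)
--                 end_t += 1
--         sentence_offsets.append((start_t, end_t))
--         start_t = end_t
--     return tokens, sentence_offsets
-- ===== SOURCE B (Python) =====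
-- def get_sentence_tokens(texts, charoffsets):
--     whole_text = "".join(texts)
--     # phase 1: per-sentence lists of non-empty tokens
--     groups = [[whole_text[s:e] for (s, e) in offset_list if whole_text[s:e]]
--               for offset_list in charoffsets]
--     # phase 2: sentence boundaries as cumulative group lengths
--     bounds = [0]
--     for g in groups:
--         bounds.append(bounds[-1] + len(g))
--     sentence_offsets = list(zip(bounds, bounds[1:]))
--     # phase 3: flatten
--     tokens = [t for g in groups for t in g]
--     return tokens, sentence_offsets
-- ===== Notes on version B (the rewrite author's own statement) =====
-- stated objective: alternative
-- what changed: Replaces the single interleaved counter loop with three separate passes: build per-sentence token groups, derive sentence offsets from cumulative group lengths, then flatten the groups.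
import Mathlib
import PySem

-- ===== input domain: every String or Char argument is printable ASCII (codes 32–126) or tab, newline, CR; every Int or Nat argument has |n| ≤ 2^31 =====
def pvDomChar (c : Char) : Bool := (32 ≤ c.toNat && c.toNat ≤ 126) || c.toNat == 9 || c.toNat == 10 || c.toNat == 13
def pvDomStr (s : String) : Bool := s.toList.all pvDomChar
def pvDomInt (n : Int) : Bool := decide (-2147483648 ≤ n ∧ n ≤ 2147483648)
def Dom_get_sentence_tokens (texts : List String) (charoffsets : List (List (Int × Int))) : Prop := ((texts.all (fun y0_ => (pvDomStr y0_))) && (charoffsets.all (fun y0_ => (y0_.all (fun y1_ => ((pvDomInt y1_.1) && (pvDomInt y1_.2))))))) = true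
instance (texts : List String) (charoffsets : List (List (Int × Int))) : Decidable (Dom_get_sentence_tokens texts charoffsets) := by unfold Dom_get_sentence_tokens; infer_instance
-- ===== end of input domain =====

-- B replaces A's single interleaved counter loop with three separate passes (groups, cumulative bounds, flatten); same cost, return value proved equal.

-- ===== PORT A =====
-- inner loop: for start, end in offset_list: …  (state: tokens, end_t)
def pvInnerA (whole : String) (ol : List (Int × Int)) (tokens : List String) (end_t : Int) :
    List String × Int :=
  match ol with
  | [] => (tokens, end_t)
  | (s, e) :: rest =>
    let cur_token := PySem.Str.slice whole (some s) (some e)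
    if PySem.Str.len cur_token > 0 then pvInnerA whole rest (tokens ++ [cur_token]) (end_t + 1)
    else pvInnerA whole rest tokens end_t

-- outer loop: for offset_list in charoffsets: …  (state: tokens, sentence_offsets, start_t)
def pvOuterA (whole : String) (cos : List (List (Int × Int))) (tokens : List String)
    (offs : List (Int × Int)) (start_t : Int) : List String × (List (Int × Int)) :=
  match cos with
  | [] => (tokens, offs)
  | ol :: rest =>
    let r := pvInnerA whole ol tokens start_t
    pvOuterA whole rest r.1 (offs ++ [(start_t, r.2)]) r.2

def get_sentence_tokens (texts : List String) (charoffsets : List (List (Int × Int))) : List String × (List (Int × Int)) :=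
  let whole_text := PySem.Str.join "" texts
  pvOuterA whole_text charoffsets [] [] 0

-- ===== PORT B =====
def get_sentence_tokens_alt (texts : List String) (charoffsets : List (List (Int × Int))) : List String × (List (Int × Int)) :=
  let whole_text := PySem.Str.join "" texts
  let groups := charoffsets.map (fun ol =>
    (ol.map (fun p => PySem.Str.slice whole_text (some p.1) (some p.2))).filter (fun t => t ≠ ""))
  let bounds := groups.foldl (fun bs g => bs ++ [bs.getLastD 0 + (g.length : Int)]) [(0 : Int)]
  let sentence_offsets := bounds.zip bounds.tail
  let tokens := groups.flatten
  (tokens, sentence_offsets)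

-- ===== PRECONDITION & SPEC =====
def Spec_get_sentence_tokens (texts : List String) (charoffsets : List (List (Int × Int))) (out : List String × (List (Int × Int))) : Prop := out = get_sentence_tokens_alt texts charoffsets
instance (texts : List String) (charoffsets : List (List (Int × Int))) (out : List String × (List (Int × Int))) : Decidable (Spec_get_sentence_tokens texts charoffsets out) := by unfold Spec_get_sentence_tokens; infer_instance

-- ===== CLAIM (what is proved, stated in full; the proofs are below) =====
def Claim_equal_get_sentence_tokens : Prop := ∀ (texts : List String) (charoffsets : List (List (Int × Int))), Dom_get_sentence_tokens texts charoffsets → Spec_get_sentence_tokens texts charoffsets (get_sentence_tokens texts charoffsets)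

-- ===== LEMMAS AND PROOFS =====

-- one sentence's non-empty tokens, as B computes them
def pvGroup (whole : String) (ol : List (Int × Int)) : List String :=
  (ol.map (fun p => PySem.Str.slice whole (some p.1) (some p.2))).filter (fun t => t ≠ "")

-- sentence offset pairs starting at l, from the group lengths
def pvOffs (l : Int) : List (List String) → List (Int × Int)
  | [] => []
  | g :: r => (l, l + g.length) :: pvOffs (l + g.length) r

-- cumulative boundaries after l
def pvCum (l : Int) : List (List String) → List Int
  | [] => []
  | g :: r => (l + g.length) :: pvCum (l + g.length) r

theorem pv_len_pos (t : String) : PySem.Str.len t > 0 ↔ t ≠ "" := by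
  have hlen : PySem.Str.len t = (t.toList.length : Int) := by simp [PySem.Str.len]
  rw [hlen]
  constructor
  · intro h he
    rw [he] at h
    simp at h
  · intro h
    have h1 : t.toList ≠ [] := fun hn => h (String.toList_eq_nil_iff.mp hn)
    have h2 : 0 < t.toList.length := List.length_pos_iff.mpr h1
    exact_mod_cast h2

theorem pvInnerA_eq (whole : String) (ol : List (Int × Int)) (tokens : List String) (e : Int) :
    pvInnerA whole ol tokens e = (tokens ++ pvGroup whole ol, e + (pvGroup whole ol).length) := by
  induction ol generalizing tokens e with
  | nil => simp [pvInnerA, pvGroup]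
  | cons p rest ih =>
    obtain ⟨s, en⟩ := p
    simp only [pvInnerA, pvGroup, List.map_cons, List.filter_cons]
    by_cases h : PySem.Str.slice whole (some s) (some en) = ""
    · have h1 : ¬ (PySem.Str.len (PySem.Str.slice whole (some s) (some en)) > 0) := by
        rw [pv_len_pos]; simpa using h
      rw [if_neg h1, ih]
      simp [h, pvGroup]
    · have h1 : PySem.Str.len (PySem.Str.slice whole (some s) (some en)) > 0 :=
        (pv_len_pos _).mpr h
      rw [if_pos h1, ih]
      simp [h, pvGroup, Prod.ext_iff]
      try omega

theorem pvOuterA_eq (whole : String) (cos : List (List (Int × Int))) (tokens : List String)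
    (offs : List (Int × Int)) (l : Int) :
    pvOuterA whole cos tokens offs l =
      (tokens ++ (cos.map (pvGroup whole)).flatten,
       offs ++ pvOffs l (cos.map (pvGroup whole))) := by
  induction cos generalizing tokens offs l with
  | nil => simp [pvOuterA, pvOffs]
  | cons ol rest ih =>
    simp only [pvOuterA, pvInnerA_eq, List.map_cons, List.flatten_cons, pvOffs]
    rw [ih]
    simp

theorem pv_bounds_eq (gs : List (List String)) (pre : List Int) (l : Int) :
    gs.foldl (fun bs g => bs ++ [bs.getLastD 0 + (g.length : Int)]) (pre ++ [l]) =
      pre ++ [l] ++ pvCum l gs := by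
  induction gs generalizing pre l with
  | nil => simp [pvCum]
  | cons g r ih =>
    simp only [List.foldl_cons, pvCum]
    have hlast : (pre ++ [l]).getLastD 0 = l := by simp
    rw [hlast]
    have : pre ++ [l] ++ [l + (g.length : Int)] = (pre ++ [l]) ++ [l + g.length] := by simp
    calc List.foldl _ (pre ++ [l] ++ [l + (g.length : Int)]) r
        = (pre ++ [l]) ++ [l + (g.length : Int)] ++ pvCum (l + g.length) r := ih (pre ++ [l]) _
      _ = pre ++ [l] ++ ((l + (g.length : Int)) :: pvCum (l + g.length) r) := by simp

theorem pv_zip_cum (gs : List (List String)) (l : Int) :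
    (l :: pvCum l gs).zip (pvCum l gs) = pvOffs l gs := by
  induction gs generalizing l with
  | nil => simp [pvCum, pvOffs]
  | cons g r ih => simp [pvCum, pvOffs, ih]

-- ===== VERDICT (by name: the statement is the Claim_ definition above) =====
theorem get_sentence_tokens_spec : Claim_equal_get_sentence_tokens := by
  intro texts cos _
  show get_sentence_tokens texts cos = get_sentence_tokens_alt texts cos
  unfold get_sentence_tokens get_sentence_tokens_alt
  simp only [pvOuterA_eq, List.nil_append]
  have hg : cos.map (pvGroup (PySem.Str.join "" texts)) =
      cos.map (fun ol => (ol.map (fun p => PySem.Str.slice (PySem.Str.join "" texts) (some p.1) (some p.2))).filter (fun t => t ≠ "")) := rfl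
  rw [← hg]
  congr 1
  have hb := pv_bounds_eq (cos.map (pvGroup (PySem.Str.join "" texts))) [] 0
  simp only [List.nil_append] at hb
  rw [hb]
  simp only [List.cons_append, List.nil_append, List.tail_cons]
  exact (pv_zip_cum _ 0).symm
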